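-- pv_equiv track=rewrite | github.com/jenny-blessing/keydroid | src/apk_meta_analysis.py | clean_genre_dict
-- ===== SOURCE A (Python) =====
-- def clean_genre_dict(d):
-- 	filtered_dict = {'GAMES': 0}
-- 	for key, value in d.items():
-- 		key_prefix = key[:4]
-- 		if key_prefix == 'GAME':
-- 			filtered_dict['GAMES'] += value
-- 		else:
-- 			filtered_dict[key] = value
-- 	return filtered_dict
-- ===== SOURCE B (Python) =====
-- def clean_genre_dict(d):
-- 	games = sum(v for k, v in d.items() if k[:4] == 'GAME')
-- 	result = {'GAMES': games}
-- 	for key, value in d.items():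
-- 		if key[:4] != 'GAME':
-- 			result[key] = value
-- 	return result
-- ===== Notes on version B (the rewrite author's own statement) =====
-- stated objective: simpler
-- what changed: Splits the single interleaved accumulation into two separate passes: a filtered sum computes the GAMES total up front, then a copy loop emits only the non-GAME entries, instead of one loop that mutates the GAMES slot while inserting.
import Mathlib
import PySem

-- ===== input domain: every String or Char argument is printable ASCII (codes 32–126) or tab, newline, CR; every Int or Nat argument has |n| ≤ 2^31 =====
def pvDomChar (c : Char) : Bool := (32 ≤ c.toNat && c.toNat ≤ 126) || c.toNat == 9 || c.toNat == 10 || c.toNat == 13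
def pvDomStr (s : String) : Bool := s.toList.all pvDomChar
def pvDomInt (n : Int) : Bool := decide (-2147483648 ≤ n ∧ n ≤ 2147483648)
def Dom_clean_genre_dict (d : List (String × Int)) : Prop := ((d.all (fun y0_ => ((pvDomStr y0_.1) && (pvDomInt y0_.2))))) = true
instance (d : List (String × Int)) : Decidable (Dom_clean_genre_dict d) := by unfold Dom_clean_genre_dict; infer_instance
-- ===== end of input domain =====

-- B splits A's single interleaved accumulation into two passes: a filtered sum for the GAMES
-- total, then a copy loop over the non-GAME entries (objective: simpler; return value only).


-- ===== PORT A =====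
-- loop body of A: key_prefix = key[:4]; GAME keys accumulate into 'GAMES', others are stored
def stepA (fd : PySem.Dict String Int) (kv : String × Int) : PySem.Dict String Int :=
  let key_prefix := PySem.Str.slice kv.1 none (some 4)
  if key_prefix == "GAME" then
    fd.modify "GAMES" 0 (· + kv.2)          -- filtered_dict['GAMES'] += value ('GAMES' is always present)
  else
    fd.insert kv.1 kv.2

def clean_genre_dict (d : List (String × Int)) : List (String × Int) :=
  (d.foldl stepA (PySem.Dict.ofList [("GAMES", 0)])).items

-- ===== PORT B =====
-- copy loop of B: skip GAME keys, copy the rest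
def stepB (r : PySem.Dict String Int) (kv : String × Int) : PySem.Dict String Int :=
  if PySem.Str.slice kv.1 none (some 4) == "GAME" then r
  else r.insert kv.1 kv.2

def clean_genre_dict_alt (d : List (String × Int)) : List (String × Int) :=
  let games : Int :=
    ((d.filter (fun kv => PySem.Str.slice kv.1 none (some 4) == "GAME")).map (·.2)).sum
  (d.foldl stepB (PySem.Dict.ofList [("GAMES", games)])).items

-- ===== PRECONDITION & SPEC =====
-- Pre_ excludes association lists with duplicate keys: they do not represent a Python dict
-- (the list→dict conversion is lossy), so neither program's behaviour on them is specified.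
def Pre_clean_genre_dict (d : List (String × Int)) : Prop := (d.map Prod.fst).Nodup
instance (d : List (String × Int)) : Decidable (Pre_clean_genre_dict d) := by unfold Pre_clean_genre_dict; infer_instance
def pvWitness_clean_genre_dict : (List (String × Int)) := [("GAME_ACTION", 3), ("TOOLS", 2), ("GAME_PUZZLE", 4)]
def Spec_clean_genre_dict (d : List (String × Int)) (out : List (String × Int)) : Prop := out = clean_genre_dict_alt d
instance (d : List (String × Int)) (out : List (String × Int)) : Decidable (Spec_clean_genre_dict d out) := by unfold Spec_clean_genre_dict; infer_instance

-- ===== CLAIM (what is proved, stated in full; the proofs are below) =====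
def Claim_equal_clean_genre_dict : Prop := ∀ (d : List (String × Int)), Dom_clean_genre_dict d → Pre_clean_genre_dict d → Spec_clean_genre_dict d (clean_genre_dict d)

-- ===== LEMMAS AND PROOFS =====

-- the GAME-prefix test, abbreviated for the proofs
def isGame (s : String) : Bool := PySem.Str.slice s none (some 4) == "GAME"

theorem isGame_GAMES : isGame "GAMES" = true := by decide

theorem stepA_eq (fd : PySem.Dict String Int) (kv : String × Int) :
    stepA fd kv = if isGame kv.1 then fd.modify "GAMES" 0 (· + kv.2) else fd.insert kv.1 kv.2 := rfl

theorem stepB_eq (r : PySem.Dict String Int) (kv : String × Int) :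
    stepB r kv = if isGame kv.1 then r else r.insert kv.1 kv.2 := rfl

-- modifying the ever-present head entry 'GAMES' rewrites it in place
theorem modify_head (g v : Int) (rest : List (String × Int))
    (h : ∀ q ∈ rest, (q.1 == "GAMES") = false) :
    ((PySem.Dict.mk (("GAMES", g) :: rest)).modify "GAMES" 0 (· + v)).items
      = ("GAMES", g + v) :: rest := by
  have hc : (PySem.Dict.mk (("GAMES", g) :: rest)).contains "GAMES" = true := by
    simp [PySem.Dict.contains_mk]
  have hg : (PySem.Dict.mk (("GAMES", g) :: rest)).getD "GAMES" 0 = g := by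
    rw [PySem.Dict.getD_eq_get?_getD, PySem.Dict.get?_mk_cons]; simp
  rw [PySem.Dict.modify, hg, PySem.Dict.items_insert, if_pos hc]
  simp only [List.map_cons, beq_self_eq_true]
  congr 1
  have h2 : ∀ p ∈ rest, (if (p.1 == "GAMES") = true then ("GAMES", g + v) else p) = id p := by
    intro p hp; simp [h p hp]
  rw [List.map_congr_left h2, List.map_id]

-- inserting a key absent from the items appends it
theorem insert_fresh (k : String) (v : Int) (its : List (String × Int))
    (h : ∀ q ∈ its, (q.1 == k) = false) :
    ((PySem.Dict.mk its).insert k v).items = its ++ [(k, v)] := by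
  have hc : (PySem.Dict.mk its).contains k = false := by
    simp only [PySem.Dict.contains_mk, List.any_eq_false]
    exact fun x hx => by simp [h x hx]
  rw [PySem.Dict.items_insert, if_neg (by simp [hc])]

-- the invariant of A's loop: the dict is ('GAMES', g) followed by the non-GAME pairs seen so far
theorem loopA (l : List (String × Int)) (g : Int) (rest : List (String × Int))
    (hrest : ∀ q ∈ rest, isGame q.1 = false)
    (hnd : (rest.map Prod.fst ++ (l.filter (fun kv => !isGame kv.1)).map Prod.fst).Nodup) :
    (l.foldl stepA (PySem.Dict.mk (("GAMES", g) :: rest))).items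
      = ("GAMES", g + ((l.filter (fun kv => isGame kv.1)).map (·.2)).sum)
          :: (rest ++ l.filter (fun kv => !isGame kv.1)) := by
  induction l generalizing g rest with
  | nil => simp
  | cons kv t ih =>
    have hne : ∀ q ∈ rest, (q.1 == "GAMES") = false := by
      intro q hq
      have := hrest q hq
      by_contra hb
      simp only [Bool.not_eq_false, beq_iff_eq] at hb
      rw [hb, isGame_GAMES] at this; exact absurd this (by simp)
    by_cases hp : isGame kv.1
    · rw [List.foldl_cons, stepA_eq, if_pos hp]
      have hm := modify_head g kv.2 rest hne
      have hmk : (PySem.Dict.mk (("GAMES", g) :: rest)).modify "GAMES" 0 (· + kv.2)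
          = PySem.Dict.mk (("GAMES", g + kv.2) :: rest) := by
        apply PySem.Dict.ext; exact hm
      rw [hmk, ih (g + kv.2) rest hrest (by simpa [hp] using hnd)]
      simp [hp, add_assoc]
    · rw [List.foldl_cons, stepA_eq, if_neg hp]
      have hfilter : ((kv :: t).filter (fun kv => !isGame kv.1)) = kv :: t.filter (fun kv => !isGame kv.1) := by
        simp [hp]
      rw [hfilter] at hnd
      have hknotrest : kv.1 ∉ rest.map Prod.fst := by
        have hdisj := (List.nodup_append.mp hnd).2.2
        intro hmem
        exact hdisj kv.1 hmem kv.1 (by simp) rfl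
      have hfresh : ∀ q ∈ ("GAMES", g) :: rest, (q.1 == kv.1) = false := by
        intro q hq
        rcases List.mem_cons.mp hq with h1 | h1
        · subst h1
          simp only [beq_eq_false_iff_ne, ne_eq]
          intro hb; rw [← hb, isGame_GAMES] at hp; exact hp rfl
        · simp only [beq_eq_false_iff_ne, ne_eq]
          intro hb; exact hknotrest (hb ▸ List.mem_map_of_mem h1)
      have hins : (PySem.Dict.mk (("GAMES", g) :: rest)).insert kv.1 kv.2
          = PySem.Dict.mk (("GAMES", g) :: (rest ++ [kv])) := by
        apply PySem.Dict.ext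
        rw [insert_fresh kv.1 kv.2 _ hfresh]
        simp
      rw [hins, ih g (rest ++ [kv])
        (by intro q hq; rcases List.mem_append.mp hq with h1 | h1
            · exact hrest q h1
            · simp only [List.mem_singleton] at h1; subst h1; exact eq_false_of_ne_true hp)
        (by simpa using hnd)]
      simp [hp, hfilter]

-- the invariant of B's copy loop: it appends exactly the non-GAME pairs
theorem loopB (l : List (String × Int)) (g : Int) (rest : List (String × Int))
    (hrest : ∀ q ∈ rest, isGame q.1 = false)
    (hnd : (rest.map Prod.fst ++ (l.filter (fun kv => !isGame kv.1)).map Prod.fst).Nodup) :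
    (l.foldl stepB (PySem.Dict.mk (("GAMES", g) :: rest))).items
      = ("GAMES", g) :: (rest ++ l.filter (fun kv => !isGame kv.1)) := by
  induction l generalizing rest with
  | nil => simp
  | cons kv t ih =>
    by_cases hp : isGame kv.1
    · rw [List.foldl_cons, stepB_eq, if_pos hp]
      rw [ih rest hrest (by simpa [hp] using hnd)]
      simp [hp]
    · rw [List.foldl_cons, stepB_eq, if_neg hp]
      have hfilter : ((kv :: t).filter (fun kv => !isGame kv.1)) = kv :: t.filter (fun kv => !isGame kv.1) := by
        simp [hp]
      rw [hfilter] at hnd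
      have hknotrest : kv.1 ∉ rest.map Prod.fst := by
        have hdisj := (List.nodup_append.mp hnd).2.2
        intro hmem
        exact hdisj kv.1 hmem kv.1 (by simp) rfl
      have hfresh : ∀ q ∈ ("GAMES", g) :: rest, (q.1 == kv.1) = false := by
        intro q hq
        rcases List.mem_cons.mp hq with h1 | h1
        · subst h1
          simp only [beq_eq_false_iff_ne, ne_eq]
          intro hb; rw [← hb, isGame_GAMES] at hp; exact hp rfl
        · simp only [beq_eq_false_iff_ne, ne_eq]
          intro hb; exact hknotrest (hb ▸ List.mem_map_of_mem h1)
      have hins : (PySem.Dict.mk (("GAMES", g) :: rest)).insert kv.1 kv.2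
          = PySem.Dict.mk (("GAMES", g) :: (rest ++ [kv])) := by
        apply PySem.Dict.ext
        rw [insert_fresh kv.1 kv.2 _ hfresh]
        simp
      rw [hins, ih (rest ++ [kv])
        (by intro q hq; rcases List.mem_append.mp hq with h1 | h1
            · exact hrest q h1
            · simp only [List.mem_singleton] at h1; subst h1; exact eq_false_of_ne_true hp)
        (by simpa using hnd)]
      simp [hfilter]

theorem nodup_filtered (d : List (String × Int)) (h : (d.map Prod.fst).Nodup) :
    ((d.filter (fun kv => !isGame kv.1)).map Prod.fst).Nodup := by
  have hsub : List.Sublist ((d.filter (fun kv => !isGame kv.1)).map Prod.fst) (d.map Prod.fst) :=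
    (List.filter_sublist).map Prod.fst
  exact h.sublist hsub

-- ===== VERDICT (by name: the statement is the Claim_ definition above) =====
theorem clean_genre_dict_spec : Claim_equal_clean_genre_dict := by
  intro d _ hpre
  unfold Spec_clean_genre_dict clean_genre_dict clean_genre_dict_alt
  have hnd : (([] : List (String × Int)).map Prod.fst
      ++ ((d.filter (fun kv => !isGame kv.1)).map Prod.fst)).Nodup := by
    simpa using nodup_filtered d hpre
  have hA := loopA d 0 [] (by intro q hq; simp at hq) hnd
  have hB := loopB d (((d.filter (fun kv => isGame kv.1)).map (·.2)).sum) [] (by intro q hq; simp at hq) hnd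
  have hofA : PySem.Dict.ofList [(("GAMES" : String), (0 : Int))]
      = PySem.Dict.mk [("GAMES", 0)] := by decide
  have hofB : PySem.Dict.ofList [(("GAMES" : String),
        ((d.filter (fun kv => isGame kv.1)).map (·.2)).sum)]
      = PySem.Dict.mk [("GAMES", ((d.filter (fun kv => isGame kv.1)).map (·.2)).sum)] := by
    apply PySem.Dict.ext
    simp [PySem.Dict.ofList, PySem.Dict.update, PySem.Dict.insert, PySem.Dict.empty, PySem.Dict.contains]
  show (d.foldl stepA (PySem.Dict.ofList [("GAMES", 0)])).items
      = (d.foldl stepB (PySem.Dict.ofList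
          [("GAMES", ((d.filter (fun kv => isGame kv.1)).map (·.2)).sum)])).items
  rw [hofA, hofB, hA, hB]
  simp
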